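-- pv_equiv track=rewrite | github.com/daryl-goh/DSA | CodeSignal/SingleFunction7b.py | solution
-- ===== SOURCE A (Python) =====
-- def solution(queryType, query):
--     # Initialize a variable 'ans' to store the final result
--     ans = 0
--     # Initialize an empty dictionary 'hmap' to store key-value pairs
--     hmap = {}
--     # Initialize variables 'ck' and 'cv' to track changes in keys and values
--     ck = 0
--     cv = 0
--
--     # Loop through the list of query types and queries
--     for i in range(len(queryType)):
--         # Extract the command (cmd) and the query (quer) for the current iteration
--         cmd = queryType[i]
--         quer = query[i]
--
--         # If the command is "insert"
--         if cmd == "insert":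
--             # Extract the key and value from the query
--             key, val = quer[0], quer[1]
--             # Modify the key and value based on 'ck' and 'cv'
--             hmap[key - ck] = val - cv
--
--         # If the command is "addToValue"
--         elif cmd == "addToValue":
--             # Extract the value 'k' from the query and update 'cv'
--             k = quer[0]
--             cv += k
--
--         # If the command is "addToKey"
--         elif cmd == "addToKey":
--             # Extract the value 'k' from the query and update 'ck'
--             k = quer[0]
--             ck += k
--
--         # If the command is "get"
--         else:
--             # Extract the value 'k' from the query and adjust 'k' based on 'ck'
--             k = quer[0] - ck
--             # Look up the corresponding value in 'hmap', add 'cv', and update 'ans'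
--             val = hmap[k] + cv
--             ans = ans + val
--
--     # Return the final answer
--     return ans
-- ===== SOURCE B (Python) =====
-- def solution(queryType, query):
--     # Eager strategy: keep the dict keyed by the literal current keys holding
--     # the literal current values; apply each add-query to the whole dict.
--     ans = 0
--     hmap = {}
--     for cmd, quer in zip(queryType, query):
--         if cmd == "insert":
--             hmap[quer[0]] = quer[1]
--         elif cmd == "addToValue":
--             k = quer[0]
--             hmap = {key: val + k for key, val in hmap.items()}
--         elif cmd == "addToKey":
--             k = quer[0]
--             hmap = {key + k: val for key, val in hmap.items()}
--         else:
--             ans += hmap[quer[0]]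
--     return ans
-- ===== Notes on version B (the rewrite author's own statement) =====
-- stated objective: alternative
-- what changed: Instead of A's lazy cumulative key/value offsets (ck, cv) with a single offset-keyed dict, B keeps the dict under its literal current keys and values, rebuilding it eagerly on every addToKey/addToValue query and answering get by a direct lookup.
import Mathlib
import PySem

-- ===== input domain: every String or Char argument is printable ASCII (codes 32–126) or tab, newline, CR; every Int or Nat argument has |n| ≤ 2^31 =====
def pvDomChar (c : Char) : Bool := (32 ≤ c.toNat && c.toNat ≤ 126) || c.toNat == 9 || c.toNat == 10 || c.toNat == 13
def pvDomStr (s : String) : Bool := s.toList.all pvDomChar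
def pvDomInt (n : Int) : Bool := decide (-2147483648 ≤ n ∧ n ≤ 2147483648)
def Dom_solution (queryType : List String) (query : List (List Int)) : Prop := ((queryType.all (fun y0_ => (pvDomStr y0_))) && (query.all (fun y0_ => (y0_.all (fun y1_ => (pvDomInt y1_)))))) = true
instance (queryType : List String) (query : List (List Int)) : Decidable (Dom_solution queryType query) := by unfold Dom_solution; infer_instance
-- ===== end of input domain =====

-- B replaces A's lazy cumulative key/value offsets by a dict that always holds the
-- literal current keys and values, rebuilt eagerly on each add-query (alternative strategy).

-- ===== PORT A =====
-- one iteration of A's loop body, on state (ans, hmap, ck, cv); cmd/quer as in A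
def solA_step (st : Int × PySem.Dict Int Int × Int × Int) (cmd : String) (quer : List Int) :
    Int × PySem.Dict Int Int × Int × Int :=
  let ans := st.1; let hmap := st.2.1; let ck := st.2.2.1; let cv := st.2.2.2
  if cmd = "insert" then
    let key := PySem.List.pyGetD quer 0 0
    let val := PySem.List.pyGetD quer 1 0
    (ans, hmap.insert (key - ck) (val - cv), ck, cv)
  else if cmd = "addToValue" then
    let k := PySem.List.pyGetD quer 0 0
    (ans, hmap, ck, cv + k)
  else if cmd = "addToKey" then
    let k := PySem.List.pyGetD quer 0 0
    (ans, hmap, ck + k, cv)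
  else
    -- hmap[k] raises KeyError when absent: excluded by Pre_solution (get? = none there)
    let k := PySem.List.pyGetD quer 0 0 - ck
    let val := ((hmap.get? k).map (· + cv)).getD 0
    (ans + val, hmap, ck, cv)

def solution (queryType : List String) (query : List (List Int)) : Int :=
  ((PySem.List.pyRange 0 (PySem.List.len queryType) 1).foldl
    (fun st j => solA_step st (PySem.List.pyGetD queryType j "") (PySem.List.pyGetD query j []))
    (0, PySem.Dict.empty, 0, 0)).1

-- ===== PORT B =====
-- one iteration of B's loop body, on state (ans, hmap)
def solB_step (st : Int × PySem.Dict Int Int) (cmd : String) (quer : List Int) :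
    Int × PySem.Dict Int Int :=
  if cmd = "insert" then
    (st.1, st.2.insert (PySem.List.pyGetD quer 0 0) (PySem.List.pyGetD quer 1 0))
  else if cmd = "addToValue" then
    let k := PySem.List.pyGetD quer 0 0
    (st.1, PySem.Dict.ofList (st.2.items.map (fun p => (p.1, p.2 + k))))
  else if cmd = "addToKey" then
    let k := PySem.List.pyGetD quer 0 0
    (st.1, PySem.Dict.ofList (st.2.items.map (fun p => (p.1 + k, p.2))))
  else
    -- hmap[quer[0]] raises KeyError when absent: excluded by Pre_solution
    (st.1 + (st.2.get? (PySem.List.pyGetD quer 0 0)).getD 0, st.2)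

def solution_alt (queryType : List String) (query : List (List Int)) : Int :=
  ((queryType.zip query).foldl (fun st p => solB_step st p.1 p.2) (0, PySem.Dict.empty)).1

-- ===== PRECONDITION & SPEC =====
-- cumulative addToKey offset just before index i (A's 'ck' at step i)
def ckAt (queryType : List String) (query : List (List Int)) (i : Nat) : Int :=
  ((List.range i).map (fun j =>
    if queryType.getD j "" = "addToKey" then (query.getD j []).getD 0 0 else 0)).sum

-- Exactly the inputs on which A returns: query at least as long as queryType (else IndexError),
-- each query row long enough for its command (else IndexError), and every command falling into
-- the final 'get' branch looks up a key some earlier insert stored (else KeyError).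
def Pre_solution (queryType : List String) (query : List (List Int)) : Prop :=
  queryType.length ≤ query.length ∧
  ∀ i < queryType.length,
    (if queryType.getD i "" = "insert" then 2 ≤ (query.getD i []).length
     else if queryType.getD i "" = "addToValue" ∨ queryType.getD i "" = "addToKey" then
       1 ≤ (query.getD i []).length
     else 1 ≤ (query.getD i []).length ∧ ∃ j < i, queryType.getD j "" = "insert" ∧
       (query.getD j []).getD 0 0 - ckAt queryType query j
         = (query.getD i []).getD 0 0 - ckAt queryType query i)
instance (queryType : List String) (query : List (List Int)) : Decidable (Pre_solution queryType query) := by unfold Pre_solution; infer_instance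

def pvWitness_solution : List String × List (List Int) := (["insert", "get"], [[1, 2], [1]])

def Spec_solution (queryType : List String) (query : List (List Int)) (out : Int) : Prop := out = solution_alt queryType query
instance (queryType : List String) (query : List (List Int)) (out : Int) : Decidable (Spec_solution queryType query out) := by unfold Spec_solution; infer_instance

-- ===== CLAIM (what is proved, stated in full; the proofs are below) =====
def Claim_equal_solution : Prop := ∀ (queryType : List String) (query : List (List Int)), Dom_solution queryType query → Pre_solution queryType query → Spec_solution queryType query (solution queryType query)

-- ===== LEMMAS AND PROOFS =====

-- the pair shift relating A's stored entries to B's literal entries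
def pvShift (c d : Int) (p : Int × Int) : Int × Int := (p.1 + c, p.2 + d)

theorem ofList_items_of_nodup (l : List (Int × Int)) (h : (l.map Prod.fst).Nodup) :
    (PySem.Dict.ofList l).items = l := by
  show (l.foldl (fun d p => d.insert p.1 p.2) PySem.Dict.empty).items = l
  rw [PySem.Dict.items_foldl_insert_fresh l Prod.fst Prod.snd _ (by simp) h]
  simp [PySem.Dict.empty]

theorem get?_mk_map_shift (l : List (Int × Int)) (c d x : Int) :
    (PySem.Dict.mk (l.map (pvShift c d))).get? (x + c)
      = ((PySem.Dict.mk l).get? x).map (· + d) := by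
  induction l with
  | nil => simp [PySem.Dict.get?]
  | cons p t ih =>
    obtain ⟨a, b⟩ := p
    simp only [List.map_cons, pvShift, PySem.Dict.get?_mk_cons]
    by_cases h : a = x
    · simp [h]
    · have h1 : (a == x) = false := by simp [h]
      have h2 : (a + c == x + c) = false := by simp; omega
      rw [h1, h2]
      simpa using ih

theorem contains_mk_map_shift (l : List (Int × Int)) (c d x : Int) :
    (PySem.Dict.mk (l.map (pvShift c d))).contains (x + c) = (PySem.Dict.mk l).contains x := by
  rw [PySem.Dict.contains_eq_isSome_get?, PySem.Dict.contains_eq_isSome_get?,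
    get?_mk_map_shift]
  cases (PySem.Dict.mk l).get? x <;> simp

theorem insert_items_map_shift (d : PySem.Dict Int Int) (c e k v : Int) :
    ((PySem.Dict.mk (d.items.map (pvShift c e))).insert (k + c) (v + e)).items
      = (d.insert k v).items.map (pvShift c e) := by
  have hc : (PySem.Dict.mk (d.items.map (pvShift c e))).contains (k + c) = d.contains k := by
    have := contains_mk_map_shift d.items c e k
    simpa using this
  by_cases h : d.contains k = true
  · rw [PySem.Dict.items_insert_of_contains _ _ (by rw [hc]; exact h),
      PySem.Dict.items_insert_of_contains _ _ h]
    simp only [List.map_map]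
    apply List.map_congr_left
    intro p _
    by_cases hp : p.1 = k
    · simp [pvShift, Function.comp, hp]
    · have h1 : (p.1 == k) = false := by simp [hp]
      have h2 : ((pvShift c e p).1 == k + c) = false := by simp [pvShift]; omega
      simp [Function.comp, h1, h2]
  · have h' : d.contains k = false := by revert h; cases d.contains k <;> simp
    rw [PySem.Dict.items_insert_of_not_contains _ _ (by rw [hc]; exact h'),
      PySem.Dict.items_insert_of_not_contains _ _ h']
    simp [pvShift]

-- the zip-fold invariant: B's state is A's state with the offsets applied eagerly
theorem inv_fold (L : List (String × List Int)) :
    ∀ (aAns : Int) (ad : PySem.Dict Int Int) (ck cv bAns : Int) (bd : PySem.Dict Int Int),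
    ad.keys.Nodup → bAns = aAns → bd.items = ad.items.map (pvShift ck cv) →
    (L.foldl (fun st p => solB_step st p.1 p.2) (bAns, bd)).1
      = (L.foldl (fun st i => solA_step st i.1 i.2) (aAns, ad, ck, cv)).1 := by
  induction L with
  | nil => intro aAns ad ck cv bAns bd _ hAns _; simpa using hAns
  | cons p t ih =>
    intro aAns ad ck cv bAns bd hnd hAns hItems
    have hbd : bd = PySem.Dict.mk (ad.items.map (pvShift ck cv)) := by
      apply PySem.Dict.ext; simpa using hItems
    have hkb : (bd.items.map Prod.fst).Nodup := by
      rw [hItems, List.map_map]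
      have e : Prod.fst ∘ pvShift ck cv = ((· + ck) ∘ Prod.fst) := rfl
      rw [e, ← List.map_map]
      exact (show (ad.items.map Prod.fst).Nodup from hnd).map (fun a b hab => by omega)
    simp only [List.foldl_cons]
    by_cases h1 : p.1 = "insert"
    · simp only [solA_step, solB_step, h1, reduceIte]
      apply ih _ _ _ _ _ _ (PySem.Dict.nodup_keys_insert _ _ _ hnd) hAns
      rw [hbd]
      have := insert_items_map_shift ad ck cv (PySem.List.pyGetD p.2 0 0 - ck)
        (PySem.List.pyGetD p.2 1 0 - cv)
      simpa using this
    · by_cases h2 : p.1 = "addToValue"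
      · simp only [solA_step, solB_step, h2, reduceIte]
        apply ih _ _ _ _ _ _ hnd hAns
        rw [ofList_items_of_nodup _ (by
          rw [List.map_map]
          have e : Prod.fst ∘ (fun q : Int × Int => (q.1, q.2 + PySem.List.pyGetD p.2 0 0))
              = Prod.fst := rfl
          rw [e]; exact hkb)]
        rw [hItems, List.map_map]
        apply List.map_congr_left; intro q _; simp [pvShift, Function.comp]; ring
      · by_cases h3 : p.1 = "addToKey"
        · simp only [solA_step, solB_step, h3, reduceIte]
          apply ih _ _ _ _ _ _ hnd hAns
          rw [ofList_items_of_nodup _ (by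
            rw [List.map_map]
            have e : Prod.fst ∘ (fun q : Int × Int => (q.1 + PySem.List.pyGetD p.2 0 0, q.2))
                = ((· + PySem.List.pyGetD p.2 0 0) ∘ Prod.fst) := rfl
            rw [e, ← List.map_map]
            exact hkb.map (fun a b hab => by omega))]
          rw [hItems, List.map_map]
          apply List.map_congr_left; intro q _; simp [pvShift, Function.comp]; ring
        · simp only [solA_step, solB_step, h1, h2, h3, reduceIte]
          apply ih _ _ _ _ _ _ hnd ?_ hItems
          rw [hAns, hbd]
          have e3 := get?_mk_map_shift ad.items ck cv (PySem.List.pyGetD p.2 0 0 - ck)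
          rw [sub_add_cancel] at e3
          have e2 : PySem.Dict.mk ad.items = ad := rfl
          rw [e2] at e3
          rw [e3]

-- an index loop over range(len ts) reading ts[i], qs[i] is a fold over zip when qs is long enough
theorem range_fold_eq_zip_fold {σ : Type} (f : σ → String → List Int → σ) :
    ∀ (ts : List String) (qs : List (List Int)) (s : σ), ts.length ≤ qs.length →
    (List.range ts.length).foldl (fun st k => f st (ts.getD k "") (qs.getD k [])) s
      = (ts.zip qs).foldl (fun st p => f st p.1 p.2) s := by
  intro ts
  induction ts with
  | nil => intro qs s _; simp
  | cons t tt ih =>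
    intro qs s hlen
    cases qs with
    | nil => simp at hlen
    | cons q qq =>
      simp only [List.length_cons]
      rw [List.range_succ_eq_map]
      simp only [List.foldl_cons, List.foldl_map, List.getD_cons_zero, List.getD_cons_succ,
        List.zip_cons_cons]
      exact ih qq (f s t q) (by simpa using hlen)

-- ===== VERDICT (by name: the statement is the Claim_ definition above) =====
theorem solution_spec : Claim_equal_solution := by
  intro ts qs _ hpre
  show solution ts qs = solution_alt ts qs
  unfold solution solution_alt
  rw [PySem.List.pyRange_one]
  simp only [PySem.List.len_eq, List.foldl_map, zero_add, Int.sub_zero, Int.toNat_natCast,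
    PySem.List.pyGetD_natCast]
  rw [range_fold_eq_zip_fold (fun st c q => solA_step st c q) ts qs _ hpre.1]
  exact (inv_fold (ts.zip qs) 0 PySem.Dict.empty 0 0 0 PySem.Dict.empty (by simp) rfl
    (by simp [PySem.Dict.empty])).symm
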